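-- pv_equiv track=rewrite | github.com/toomzheng/dsc20 | homework/hw01.py | renter
-- ===== SOURCE A (Python) =====
-- def renter(name1, name2, name3):
--     """
--     Put each of the name parameters into a list and reverse their order. This
--     is so that if multiple names have the same length, we always take the last
--     possible name, which when reversed results in the first possible name.
--
--     Create a for-loop to iterate through the list of names and check the length
--     of each name. If it is bigger, replace the longest length and keep note of
--     that name. Finally, return the longest name.
--
--     ##############################################################
--     # TODO: Replace this block of comments with your own         #
--     # method description and add at least 3 more doctests below. #
--     ##############################################################
--
--     >>> renter("K", "BB", "Joy")
--     'Joy'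
--     >>> renter("Joy", "K", "BB")
--     'Joy'
--     >>> renter("BB", "Joy", "K")
--     'Joy'
--     >>> renter("BB", "K", "Jo")
--     'Jo'
--     >>> renter("BB", "Jo", "Su")
--     'Su'
--
--     # Add your own doctests below
--     >>> renter("", "", "")
--     ''
--     >>> renter("120391283", "hello", "")
--     '120391283'
--     >>> renter("Tom Zheng", "Matt Li", "Montre Ward")
--     'Montre Ward'
--     """
--     # YOUR CODE GOES HERE #
--     # reverse the list so we can take the first instance of the longest name #
--     lst = [name3, name2, name1]
--     # initialize our "longest" variable to be -1 to account for empty strings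
--     longest = -1
--     # the problem indicates string inputs, no need to worry about other types
--     for name in lst:
--         if len(name) > longest:
--             longest = len(name)
--             longest_name = name
--     return longest_name
-- ===== SOURCE B (Python) =====
-- def renter(name1, name2, name3):
--     # Longest of the three names; on ties the last such name wins,
--     # expressed as nested conditionals instead of a list/loop.
--     if len(name3) >= len(name1) and len(name3) >= len(name2):
--         return name3
--     if len(name2) >= len(name1):
--         return name2
--     return name1
-- ===== Notes on version B (the rewrite author's own statement) =====
-- stated objective: simpler
-- what changed: Replaced the reversed-list accumulator loop by direct nested conditional comparisons of the three lengths (last tie winner kept via >=).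
import Mathlib
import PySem

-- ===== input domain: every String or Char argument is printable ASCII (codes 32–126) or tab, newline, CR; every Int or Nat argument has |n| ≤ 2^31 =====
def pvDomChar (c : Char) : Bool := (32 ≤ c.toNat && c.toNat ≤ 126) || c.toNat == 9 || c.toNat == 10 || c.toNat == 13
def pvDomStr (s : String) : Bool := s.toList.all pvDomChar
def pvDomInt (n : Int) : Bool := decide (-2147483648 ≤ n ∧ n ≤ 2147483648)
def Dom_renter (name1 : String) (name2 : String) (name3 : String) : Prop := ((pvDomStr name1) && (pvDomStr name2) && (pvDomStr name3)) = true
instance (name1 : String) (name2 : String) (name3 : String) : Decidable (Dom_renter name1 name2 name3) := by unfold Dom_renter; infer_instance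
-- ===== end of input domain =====

-- B replaces A's reversed-list maximum loop with nested conditional comparisons of the three lengths (simpler decomposition).


-- ===== PORT A =====
-- literal port of A: lst = [name3, name2, name1]; longest = -1; loop updating (longest, longest_name)
-- (the initial longest_name "" is never returned: the first iteration always assigns, as len ≥ 0 > -1)
def renter (name1 : String) (name2 : String) (name3 : String) : String :=
  let lst : List String := [name3, name2, name1]
  let r := lst.foldl (fun (st : Int × String) name =>
    if PySem.Str.len name > st.1 then (PySem.Str.len name, name) else st) (-1, "")
  r.2

-- ===== PORT B =====
-- port of B: nested conditionals, no list/loop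
def renter_alt (name1 : String) (name2 : String) (name3 : String) : String :=
  if PySem.Str.len name3 ≥ PySem.Str.len name1 ∧ PySem.Str.len name3 ≥ PySem.Str.len name2 then name3
  else if PySem.Str.len name2 ≥ PySem.Str.len name1 then name2
  else name1

-- ===== PRECONDITION & SPEC =====
def Spec_renter (name1 : String) (name2 : String) (name3 : String) (out : String) : Prop := out = renter_alt name1 name2 name3
instance (name1 : String) (name2 : String) (name3 : String) (out : String) : Decidable (Spec_renter name1 name2 name3 out) := by unfold Spec_renter; infer_instance

-- ===== CLAIM (what is proved, stated in full; the proofs are below) =====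
def Claim_equal_renter : Prop := ∀ (name1 : String) (name2 : String) (name3 : String), Dom_renter name1 name2 name3 → Spec_renter name1 name2 name3 (renter name1 name2 name3)

-- ===== LEMMAS AND PROOFS =====

-- ===== VERDICT (by name: the statement is the Claim_ definition above) =====
theorem renter_spec : Claim_equal_renter := by
  intro name1 name2 name3 _
  unfold Spec_renter renter renter_alt
  simp only [List.foldl]
  have h1 : (0:Int) ≤ PySem.Str.len name1 := by simp [PySem.Str.len_eq]
  have h3 : (0:Int) ≤ PySem.Str.len name3 := by simp [PySem.Str.len_eq]
  split_ifs <;> simp_all <;> omega
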